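-- pv_equiv track=rewrite | github.com/nanjiangshu/TMplot | src/drawMSATopo.py | GetSpecialProIndex
-- ===== SOURCE A (Python) =====
-- def GetSpecialProIndex(seqIDIndexDict):# {{{
--     """
--     Get index for special proteins
--     return a dict with keys
--     'reppro' = []
--     'pdb' = []
--     'final' = []
--     """
--     li_reppro = []
--     li_pdb = []
--     li_final = []
--
--     for seqID in sorted(seqIDIndexDict.keys()):
--         if seqID.find("rep") == 0:
--             li_reppro.append(seqIDIndexDict[seqID])
--         elif seqID.find("pdb_") == 0:
--             li_pdb.append(seqIDIndexDict[seqID])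
--         elif seqID.find("final") == 0:
--             li_final.append(seqIDIndexDict[seqID])
--
--     dt = {}
--     dt['reppro'] = li_reppro
--     dt['pdb'] = li_pdb
--     dt['final'] = li_final
--     return dt
-- ===== SOURCE B (Python) =====
-- PREFIXES = (('rep', 'reppro'), ('pdb_', 'pdb'), ('final', 'final'))
--
--
-- def _classify(seqID):
--     """Name of the bucket this ID belongs to, or None."""
--     for prefix, name in PREFIXES:
--         if seqID.startswith(prefix):
--             return name
--     return None
--
--
-- def GetSpecialProIndex(seqIDIndexDict):
--     """Tag each entry with its bucket, group the (id, index) pairs into a dict of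
--     buckets in one unsorted pass, then sort each small bucket by id and read off
--     the indices (group-then-sort instead of A's global sort-then-classify scan)."""
--     tagged = [(_classify(seqID), (seqID, idx)) for seqID, idx in seqIDIndexDict.items()]
--     buckets = {}
--     for name, pair in tagged:
--         buckets.setdefault(name, []).append(pair)
--     return {name: [idx for _, idx in sorted(buckets.get(name, []), key=lambda p: p[0])]
--             for name in ('reppro', 'pdb', 'final')}
-- ===== Notes on version B (the rewrite author's own statement) =====
-- stated objective: alternative
-- what changed: A sorts all keys once and classifies them in one elif scan reading values back through the dict; B never builds a global sorted order: it tags each raw item with its bucket name, groups the (id, index) pairs into a dict of buckets in a single unsorted pass, then sorts each small bucket by id and reads off the indices (group-then-sort instead of sort-then-classify).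
import Mathlib
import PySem

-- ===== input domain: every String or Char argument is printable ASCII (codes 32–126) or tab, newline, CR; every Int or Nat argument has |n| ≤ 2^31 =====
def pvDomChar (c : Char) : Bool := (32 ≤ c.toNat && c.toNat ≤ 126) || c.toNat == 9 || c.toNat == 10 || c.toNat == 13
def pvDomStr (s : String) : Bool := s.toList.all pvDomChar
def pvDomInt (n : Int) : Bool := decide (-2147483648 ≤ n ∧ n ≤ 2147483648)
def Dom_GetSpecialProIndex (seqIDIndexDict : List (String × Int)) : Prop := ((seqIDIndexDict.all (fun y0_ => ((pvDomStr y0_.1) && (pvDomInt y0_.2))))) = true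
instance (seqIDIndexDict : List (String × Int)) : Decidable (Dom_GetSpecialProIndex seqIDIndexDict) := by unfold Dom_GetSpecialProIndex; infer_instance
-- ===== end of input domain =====

-- B replaces A's global sort-then-classify scan by a group-then-sort pipeline: tag each raw
-- item with its bucket, group the pairs into a dict of buckets in one unsorted pass, then
-- sort each small bucket by id (objective: alternative decomposition, same O(n log n) cost).

-- ===== PORT A =====
def GetSpecialProIndex (seqIDIndexDict : List (String × Int)) : List (String × List Int) :=
  let d := PySem.Dict.ofList seqIDIndexDict
  let r := (PySem.List.sorted (PySem.Dict.keys d) (fun k => k) false).foldl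
    (fun (acc : List Int × List Int × List Int) seqID =>
      if PySem.Str.find seqID "rep" == 0 then
        (acc.1 ++ [PySem.Dict.getD d seqID 0], acc.2.1, acc.2.2)
      else if PySem.Str.find seqID "pdb_" == 0 then
        (acc.1, acc.2.1 ++ [PySem.Dict.getD d seqID 0], acc.2.2)
      else if PySem.Str.find seqID "final" == 0 then
        (acc.1, acc.2.1, acc.2.2 ++ [PySem.Dict.getD d seqID 0])
      else acc)
    ([], [], [])
  [("reppro", r.1), ("pdb", r.2.1), ("final", r.2.2)]

-- ===== PORT B =====
-- _classify's 'for prefix, name in PREFIXES: return name on match' loop, as structural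
-- recursion over the same literal table
def pvClassifyGo : List (String × String) → String → Option String
  | [], _ => none
  | (pre, name) :: rest, k =>
      if PySem.Str.startswith k pre then some name else pvClassifyGo rest k

def pvClassify (k : String) : Option String :=
  pvClassifyGo [("rep", "reppro"), ("pdb_", "pdb"), ("final", "final")] k

def GetSpecialProIndex_alt (seqIDIndexDict : List (String × Int)) : List (String × List Int) :=
  let items := (PySem.Dict.ofList seqIDIndexDict).items
  let tagged := items.map (fun pr => (pvClassify pr.1, pr))
  let buckets := tagged.foldl
    (fun (b : PySem.Dict (Option String) (List (String × Int))) t =>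
      PySem.Dict.modify b t.1 [] (· ++ [t.2]))
    PySem.Dict.empty
  ["reppro", "pdb", "final"].map (fun name =>
    (name, (PySem.List.sorted (PySem.Dict.getD buckets (some name) []) (fun p => p.1) false).map (·.2)))

-- ===== PRECONDITION & SPEC =====
def Spec_GetSpecialProIndex (seqIDIndexDict : List (String × Int)) (out : List (String × List Int)) : Prop := out = GetSpecialProIndex_alt seqIDIndexDict
instance (seqIDIndexDict : List (String × Int)) (out : List (String × List Int)) : Decidable (Spec_GetSpecialProIndex seqIDIndexDict out) := by unfold Spec_GetSpecialProIndex; infer_instance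

-- ===== CLAIM (what is proved, stated in full; the proofs are below) =====
def Claim_equal_GetSpecialProIndex : Prop := ∀ (seqIDIndexDict : List (String × Int)), Dom_GetSpecialProIndex seqIDIndexDict → Spec_GetSpecialProIndex seqIDIndexDict (GetSpecialProIndex seqIDIndexDict)

-- ===== LEMMAS AND PROOFS =====

-- find s p = 0 means p is a prefix of s (both ways)
lemma pvFind_eq_zero_iff_prefix (s p : List Char) : PySem.Chars.find s p = 0 ↔ p <+: s := by
  constructor
  · intro h
    have hs := PySem.Chars.find_spec (s := s) (sub := p) (by omega)
    simpa [h] using hs.1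
  · intro h
    have h0 : 0 ≤ PySem.Chars.find s p := (PySem.Chars.find_nonneg_iff _ _).mpr h.isInfix
    have hs := PySem.Chars.find_spec (s := s) (sub := p) h0
    by_contra hne
    have hpos : 0 < (PySem.Chars.find s p).toNat := by omega
    exact hs.2 0 hpos (by simpa using h)

-- A's condition 'seqID.find(p) == 0' is exactly 'seqID.startswith(p)'
lemma pvFindZero_eq_startswith (k p : String) :
    (PySem.Str.find k p == 0) = PySem.Str.startswith k p := by
  by_cases h : p.toList <+: k.toList
  · have h1 : PySem.Chars.find k.toList p.toList = 0 := (pvFind_eq_zero_iff_prefix _ _).mpr h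
    have h2 : PySem.Chars.startswith k.toList p.toList = true := (PySem.Chars.startswith_iff _ _).mpr h
    simp [PySem.Str.find_eq, PySem.Str.startswith_eq, h1, h2]
  · have h1 : PySem.Chars.find k.toList p.toList ≠ 0 := fun hc => h ((pvFind_eq_zero_iff_prefix _ _).mp hc)
    have h2 : PySem.Chars.startswith k.toList p.toList = false := by
      cases hb : PySem.Chars.startswith k.toList p.toList
      · rfl
      · exact absurd ((PySem.Chars.startswith_iff _ _).mp hb) h
    simp [PySem.Str.find_eq, PySem.Str.startswith_eq, h2, h1]

-- two prefixes with different first characters cannot both be prefixes of s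
lemma pvPrefix_excl {s t u : List Char} {a b : Char} (hab : a ≠ b)
    (h : (a :: t) <+: s) : ¬ (b :: u) <+: s := by
  rintro ⟨u1, hu⟩
  rcases h with ⟨t1, ht⟩
  rw [← ht] at hu
  simp only [List.cons_append] at hu
  injection hu with h1 _
  exact hab h1.symm

-- startswith exclusivity between the three prefixes
lemma pvExcl (k : String) {p q : List Char} {a b : Char} (hab : a ≠ b)
    (hp : p = a :: p.tail) (hq : q = b :: q.tail)
    (h : PySem.Chars.startswith k.toList p = true) :
    PySem.Chars.startswith k.toList q = false := by
  have hpre := (PySem.Chars.startswith_iff _ _).mp h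
  cases hb : PySem.Chars.startswith k.toList q
  · rfl
  · have hqre := (PySem.Chars.startswith_iff _ _).mp hb
    rw [hp] at hpre
    rw [hq] at hqre
    exact absurd hqre (pvPrefix_excl hab hpre)

lemma pvRep_not_pdb (k : String) (h : PySem.Str.startswith k "rep" = true) :
    PySem.Str.startswith k "pdb_" = false := by
  simp only [PySem.Str.startswith_eq] at h ⊢
  exact pvExcl k (a := 'r') (b := 'p') (by decide) rfl rfl h

lemma pvRep_not_final (k : String) (h : PySem.Str.startswith k "rep" = true) :
    PySem.Str.startswith k "final" = false := by
  simp only [PySem.Str.startswith_eq] at h ⊢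
  exact pvExcl k (a := 'r') (b := 'f') (by decide) rfl rfl h

lemma pvPdb_not_rep (k : String) (h : PySem.Str.startswith k "pdb_" = true) :
    PySem.Str.startswith k "rep" = false := by
  simp only [PySem.Str.startswith_eq] at h ⊢
  exact pvExcl k (a := 'p') (b := 'r') (by decide) rfl rfl h

lemma pvPdb_not_final (k : String) (h : PySem.Str.startswith k "pdb_" = true) :
    PySem.Str.startswith k "final" = false := by
  simp only [PySem.Str.startswith_eq] at h ⊢
  exact pvExcl k (a := 'p') (b := 'f') (by decide) rfl rfl h

lemma pvFinal_not_rep (k : String) (h : PySem.Str.startswith k "final" = true) :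
    PySem.Str.startswith k "rep" = false := by
  simp only [PySem.Str.startswith_eq] at h ⊢
  exact pvExcl k (a := 'f') (b := 'r') (by decide) rfl rfl h

lemma pvFinal_not_pdb (k : String) (h : PySem.Str.startswith k "final" = true) :
    PySem.Str.startswith k "pdb_" = false := by
  simp only [PySem.Str.startswith_eq] at h ⊢
  exact pvExcl k (a := 'f') (b := 'p') (by decide) rfl rfl h

-- classification tests expressed through pvClassify (using exclusivity)
lemma pvClassify_eq_reppro (k : String) :
    (pvClassify k == some "reppro") = PySem.Str.startswith k "rep" := by
  simp only [pvClassify, pvClassifyGo]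
  cases hr : PySem.Str.startswith k "rep"
  · split_ifs <;> simp_all
  · simp

lemma pvClassify_eq_pdb (k : String) :
    (pvClassify k == some "pdb") = PySem.Str.startswith k "pdb_" := by
  simp only [pvClassify, pvClassifyGo]
  cases hp : PySem.Str.startswith k "pdb_"
  · split_ifs <;> simp_all
  · have hr := pvPdb_not_rep k hp
    simp_all

lemma pvClassify_eq_final (k : String) :
    (pvClassify k == some "final") = PySem.Str.startswith k "final" := by
  simp only [pvClassify, pvClassifyGo]
  cases hf : PySem.Str.startswith k "final"
  · split_ifs <;> simp_all
  · have hr := pvFinal_not_rep k hf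
    have hp := pvFinal_not_pdb k hf
    simp_all

-- A's classifying fold over the sorted keys, closed form: three filtered passes
lemma pvLoop_eq (f : String → Int) (ks : List String) (a b c : List Int) :
    ks.foldl
      (fun (acc : List Int × List Int × List Int) k =>
        if PySem.Str.find k "rep" == 0 then (acc.1 ++ [f k], acc.2.1, acc.2.2)
        else if PySem.Str.find k "pdb_" == 0 then (acc.1, acc.2.1 ++ [f k], acc.2.2)
        else if PySem.Str.find k "final" == 0 then (acc.1, acc.2.1, acc.2.2 ++ [f k])
        else acc) (a, b, c)
    = (a ++ (ks.filter (fun k => PySem.Str.startswith k "rep")).map f,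
       b ++ (ks.filter (fun k => PySem.Str.startswith k "pdb_")).map f,
       c ++ (ks.filter (fun k => PySem.Str.startswith k "final")).map f) := by
  induction ks generalizing a b c with
  | nil => simp
  | cons k ks ih =>
    have hre := pvFindZero_eq_startswith k "rep"
    have hpd := pvFindZero_eq_startswith k "pdb_"
    have hfi := pvFindZero_eq_startswith k "final"
    rw [List.foldl_cons]
    cases hr : PySem.Str.startswith k "rep"
    · cases hp : PySem.Str.startswith k "pdb_"
      · cases hf : PySem.Str.startswith k "final"
        · simp only [List.filter_cons, hre, hpd, hfi, hr, hp, hf, if_false, Bool.false_eq_true]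
          exact ih a b c
        · simp only [List.filter_cons, hre, hpd, hfi, hr, hp, hf, if_true, if_false, Bool.false_eq_true]
          rw [ih a b (c ++ [f k])]
          simp
      · have hf := pvPdb_not_final k hp
        simp only [List.filter_cons, hre, hpd, hfi, hr, hp, hf, if_true, if_false, Bool.false_eq_true]
        rw [ih a (b ++ [f k]) c]
        simp
    · have hp := pvRep_not_pdb k hr
      have hf := pvRep_not_final k hr
      simp only [List.filter_cons, hre, hpd, hfi, hr, hp, hf, if_true, if_false, Bool.false_eq_true]
      rw [ih (a ++ [f k]) b c]
      simp

-- sorting a filtered bucket of items by id = filtering the globally sorted keys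
lemma pvBucket_eq (l : List (String × Int)) (p : String → Bool) :
    (PySem.List.sorted
        ((PySem.Dict.ofList l).items.filter (fun pr => p pr.1)) (fun pr => pr.1) false).map (·.2)
    = ((PySem.List.sorted (PySem.Dict.keys (PySem.Dict.ofList l)) (fun k => k) false).filter p).map
        (fun k => PySem.Dict.getD (PySem.Dict.ofList l) k 0) := by
  set d := PySem.Dict.ofList l with hd
  have hnd : (PySem.Dict.keys d).Nodup := PySem.Dict.nodup_keys_ofList l
  have hitems : d.items = (PySem.Dict.keys d).map (fun k => (k, PySem.Dict.getD d k 0)) :=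
    PySem.Dict.items_eq_map_keys d hnd 0
  set ks := PySem.List.sorted (PySem.Dict.keys d) (fun k => k) false with hks
  have hperm : ks.Perm (PySem.Dict.keys d) := PySem.List.sorted_perm _ _ _
  have hksnd : ks.Nodup := hperm.symm.nodup hnd
  have hksle : ks.Pairwise (fun a b => a ≤ b) := PySem.List.sorted_pairwise _ _
  have hkslt : ks.Pairwise (fun a b => a < b) := by
    have := List.Pairwise.and hksle hksnd
    exact this.imp (fun h => lt_of_le_of_ne h.1 h.2)
  -- the candidate sorted bucket
  have hmain : PySem.List.sorted ((d.items).filter (fun pr => p pr.1)) (fun pr => pr.1) false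
      = (ks.filter p).map (fun k => (k, PySem.Dict.getD d k 0)) := by
    apply PySem.List.sorted_eq_of_perm_of_pairwise_lt
    · -- permutation
      have h1 : (d.items).filter (fun pr => p pr.1)
          = ((PySem.Dict.keys d).filter p).map (fun k => (k, PySem.Dict.getD d k 0)) := by
        rw [hitems, List.filter_map]
        rfl
      rw [h1]
      exact (hperm.filter p).map _
    · -- strictly increasing on the key
      rw [List.pairwise_map]
      exact (hkslt.filter p).imp (fun h => h)
  rw [hmain, List.map_map]
  rfl

-- B's grouping fold, read back through getD: the bucket at a tag
lemma pvBuckets_getD (l : List (String × Int)) (c : Option String) :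
    PySem.Dict.getD
      (((PySem.Dict.ofList l).items.map (fun pr => (pvClassify pr.1, pr))).foldl
        (fun (b : PySem.Dict (Option String) (List (String × Int))) t =>
          PySem.Dict.modify b t.1 [] (· ++ [t.2]))
        PySem.Dict.empty) c []
    = (PySem.Dict.ofList l).items.filter (fun pr => pvClassify pr.1 == c) := by
  rw [PySem.Dict.getD_foldl_modify_append, PySem.Dict.getD_empty, List.nil_append,
    List.filter_map]
  simp [Function.comp_def]

-- ===== VERDICT (by name: the statement is the Claim_ definition above) =====
theorem GetSpecialProIndex_spec : Claim_equal_GetSpecialProIndex := by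
  intro l _
  unfold Spec_GetSpecialProIndex GetSpecialProIndex GetSpecialProIndex_alt
  simp only [pvLoop_eq, pvBuckets_getD, List.map_cons, List.map_nil]
  rw [show ((PySem.Dict.ofList l).items.filter (fun pr => pvClassify pr.1 == some "reppro"))
      = ((PySem.Dict.ofList l).items.filter (fun pr => PySem.Str.startswith pr.1 "rep")) from by
      apply List.filter_congr; intro pr _; rw [pvClassify_eq_reppro]]
  rw [show ((PySem.Dict.ofList l).items.filter (fun pr => pvClassify pr.1 == some "pdb"))
      = ((PySem.Dict.ofList l).items.filter (fun pr => PySem.Str.startswith pr.1 "pdb_")) from by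
      apply List.filter_congr; intro pr _; rw [pvClassify_eq_pdb]]
  rw [show ((PySem.Dict.ofList l).items.filter (fun pr => pvClassify pr.1 == some "final"))
      = ((PySem.Dict.ofList l).items.filter (fun pr => PySem.Str.startswith pr.1 "final")) from by
      apply List.filter_congr; intro pr _; rw [pvClassify_eq_final]]
  rw [pvBucket_eq l (fun k => PySem.Str.startswith k "rep"),
      pvBucket_eq l (fun k => PySem.Str.startswith k "pdb_"),
      pvBucket_eq l (fun k => PySem.Str.startswith k "final")]
  simp
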